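-- pv_equiv track=rewrite | github.com/kirdmiv/Code-andother-stuff | vkoshp2017/jksdnlkfwgekjbwregojfewkfehliewbgjkebre/b.py | check
-- ===== SOURCE A (Python) =====
-- def check(n, k):
--     r1 = n // k
--     r2 = n - (k * (n // k))
--     n2 = n - r2
--     ans = 0
--     r3 = 0
--     while n2 > 0:
--         ans += (r3 * r1)
--         r3 += r1
--         n2 -= r1
--     ad = n - r1 - 1
--     while r2 > 0:
--         r2 -= 1
--         ans += ad - r2
--     return ans
-- ===== SOURCE B (Python) =====
-- def check(n, k):
--     q, r = divmod(n, k)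
--     ans = q * q * k * (k - 1) // 2 if k * q > 0 else 0
--     if r > 0:
--         ans += r * (n - q - 1) - r * (r - 1) // 2
--     return ans
-- ===== Notes on version B (the rewrite author's own statement) =====
-- stated objective: faster
-- what changed: Both while-loops are replaced by closed-form arithmetic-series formulas: the first loop sums q^2*(0+1+...+(k-1)) and the second sums r consecutive integers, so B computes the answer in O(1) with no loop.
import Mathlib
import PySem

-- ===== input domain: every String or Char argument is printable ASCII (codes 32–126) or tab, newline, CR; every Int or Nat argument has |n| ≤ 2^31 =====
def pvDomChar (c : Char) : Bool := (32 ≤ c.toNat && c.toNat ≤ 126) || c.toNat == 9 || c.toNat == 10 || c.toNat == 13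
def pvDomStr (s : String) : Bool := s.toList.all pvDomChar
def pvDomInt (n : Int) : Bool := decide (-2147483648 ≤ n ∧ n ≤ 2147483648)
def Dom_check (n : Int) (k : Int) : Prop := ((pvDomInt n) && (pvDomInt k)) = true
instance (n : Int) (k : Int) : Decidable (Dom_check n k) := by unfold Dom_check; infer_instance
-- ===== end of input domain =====

-- B replaces A's two accumulation while-loops by closed-form arithmetic-series formulas (O(1) instead of O(n)).

-- ===== PORT A =====
-- first while loop: while n2 > 0: ans += r3*r1; r3 += r1; n2 -= r1
-- (the extra '0 < r1' guard only makes the recursion total: when n2 > 0 and r1 ≤ 0 the Python loop diverges, which Pre_check excludes)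
def checkLoop1 (r1 : Int) (ans : Int) (r3 : Int) (n2 : Int) : Int × Int :=
  if h : 0 < n2 ∧ 0 < r1 then
    checkLoop1 r1 (ans + r3 * r1) (r3 + r1) (n2 - r1)
  else (ans, r3)
termination_by n2.toNat
decreasing_by omega

-- second while loop: while r2 > 0: r2 -= 1; ans += ad - r2
def checkLoop2 (ad : Int) (ans : Int) (r2 : Int) : Int :=
  if h : 0 < r2 then
    checkLoop2 ad (ans + (ad - (r2 - 1))) (r2 - 1)
  else ans
termination_by r2.toNat
decreasing_by omega

def check (n : Int) (k : Int) : Int :=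
  let r1 := PySem.Int.floordiv n k
  let r2 := n - k * PySem.Int.floordiv n k
  let n2 := n - r2
  let p := checkLoop1 r1 0 0 n2
  let ad := n - r1 - 1
  checkLoop2 ad p.1 r2

-- ===== PORT B =====
def check_alt (n : Int) (k : Int) : Int :=
  let q := PySem.Int.floordiv n k
  let r := PySem.Int.mod n k
  let ans := if 0 < k * q then PySem.Int.floordiv (q * q * k * (k - 1)) 2 else 0
  if 0 < r then ans + (r * (n - q - 1) - PySem.Int.floordiv (r * (r - 1)) 2) else ans

-- ===== PRECONDITION & SPEC =====
-- Pre_check excludes k = 0 (A raises ZeroDivisionError) and n > 0 with k < 0 (A's first loop never terminates).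
def Pre_check (n : Int) (k : Int) : Prop := 0 < k ∨ (k < 0 ∧ n ≤ 0)
instance (n : Int) (k : Int) : Decidable (Pre_check n k) := by unfold Pre_check; infer_instance
def pvWitness_check : Int × Int := (17, 5)
def Spec_check (n : Int) (k : Int) (out : Int) : Prop := out = check_alt n k
instance (n : Int) (k : Int) (out : Int) : Decidable (Spec_check n k out) := by unfold Spec_check; infer_instance

-- ===== CLAIM (what is proved, stated in full; the proofs are below) =====
def Claim_equal_check : Prop := ∀ (n : Int) (k : Int), Dom_check n k → Pre_check n k → Spec_check n k (check n k)

-- ===== LEMMAS AND PROOFS =====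

-- triangle number as an Int
def tri (c : Nat) : Int := (c : Int) * ((c : Int) - 1) / 2

theorem tri_succ (c : Nat) : tri (c + 1) = tri c + c := by
  unfold tri
  push_cast
  have h : ((c : Int) + 1) * ((c : Int) + 1 - 1) = (c : Int) * ((c : Int) - 1) + 2 * (c : Int) := by ring
  rw [h]
  omega

-- closed form of the first loop, run on n2 = c * r1 with 0 < r1
theorem checkLoop1_closed (c : Nat) (r1 ans r3 : Int) (h : 0 < r1) :
    checkLoop1 r1 ans r3 ((c : Int) * r1) = (ans + (c : Int) * r3 * r1 + r1 * r1 * tri c, r3 + (c : Int) * r1) := by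
  induction c generalizing ans r3 with
  | zero =>
    rw [checkLoop1]
    simp [tri]
  | succ c ih =>
    rw [checkLoop1]
    have hpos : 0 < ((c : Int) + 1) * r1 := by positivity
    rw [dif_pos ⟨by push_cast; linarith, h⟩]
    have : ((c : Int) + 1) * r1 - r1 = (c : Int) * r1 := by ring
    push_cast
    rw [this, ih]
    rw [tri_succ]
    push_cast
    simp only [Prod.mk.injEq]
    constructor <;> ring

-- if n2 ≤ 0 the first loop does nothing
theorem checkLoop1_nonpos (r1 ans r3 n2 : Int) (h : n2 ≤ 0) :
    checkLoop1 r1 ans r3 n2 = (ans, r3) := by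
  rw [checkLoop1]
  rw [dif_neg (by omega)]

-- closed form of the second loop, run on r2 = c ≥ 0
theorem checkLoop2_closed (c : Nat) (ad ans : Int) :
    checkLoop2 ad ans (c : Int) = ans + (c : Int) * ad - tri c := by
  induction c generalizing ans with
  | zero =>
    rw [checkLoop2]
    simp [tri]
  | succ c ih =>
    rw [checkLoop2]
    rw [dif_pos (by push_cast; omega)]
    have h1 : ((c : Nat) + 1 : Int) - 1 = (c : Int) := by push_cast; ring
    push_cast
    rw [show (c : Int) + 1 - 1 = (c : Int) by ring, ih, tri_succ]
    push_cast
    ring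

theorem checkLoop2_closed' (ad ans r2 : Int) (h : 0 ≤ r2) :
    checkLoop2 ad ans r2 = ans + r2 * ad - tri r2.toNat := by
  obtain ⟨c, rfl⟩ : ∃ c : Nat, r2 = (c : Int) := ⟨r2.toNat, by omega⟩
  rw [checkLoop2_closed]
  simp

-- if r2 ≤ 0 the second loop does nothing
theorem checkLoop2_nonpos (ad ans r2 : Int) (h : r2 ≤ 0) :
    checkLoop2 ad ans r2 = ans := by
  rw [checkLoop2]
  rw [dif_neg (by omega)]

-- ===== VERDICT (by name: the statement is the Claim_ definition above) =====
theorem check_spec : Claim_equal_check := by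
  intro n k _ hpre
  unfold Spec_check check check_alt
  simp only []
  set q := PySem.Int.floordiv n k with hq
  set r := PySem.Int.mod n k with hr
  have hqr : q * k + r = n := PySem.Int.floordiv_mul_add_mod n k
  have hrw : n - k * q = r := by linarith
  rw [hrw]
  rcases hpre with hk | ⟨hk, hn⟩
  · -- k > 0
    have hr0 : 0 ≤ r := PySem.Int.mod_nonneg n hk
    have hrk : r < k := PySem.Int.mod_lt n hk
    have hn2 : n - r = k * q := by linarith
    rw [hn2]
    have hloop2 : checkLoop2 (n - q - 1) ((checkLoop1 q 0 0 (k * q)).1) r =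
        (checkLoop1 q 0 0 (k * q)).1 + r * (n - q - 1) - tri r.toNat :=
      checkLoop2_closed' _ _ _ hr0
    have hloop2b : 0 < r → r * (n - q - 1) - tri r.toNat = r * (n - q - 1) - PySem.Int.floordiv (r * (r - 1)) 2 := by
      intro _
      rw [PySem.Int.floordiv_eq_ediv_of_pos (by omega : (0:Int) < 2)]
      unfold tri
      have : ((r.toNat : Nat) : Int) = r := by omega
      rw [this]
    by_cases hq0 : 0 < q
    · -- first loop runs k times
      have hone : (checkLoop1 q 0 0 (k * q)).1 = q * q * tri k.toNat := by
        have hck : k * q = ((k.toNat : Nat) : Int) * q := by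
          congr 1
          omega
        rw [hck, checkLoop1_closed k.toNat q 0 0 hq0]
        ring
      have hkq : 0 < k * q := by positivity
      have hans1 : q * q * tri k.toNat = PySem.Int.floordiv (q * q * k * (k - 1)) 2 := by
        rw [PySem.Int.floordiv_eq_ediv_of_pos (by omega : (0:Int) < 2)]
        unfold tri
        have hkk : ((k.toNat : Nat) : Int) = k := by omega
        rw [hkk]
        have heven : (2 : Int) ∣ k * (k - 1) := by
          rcases Int.even_mul_succ_self (k - 1) with ⟨m, hm⟩
          exact ⟨m, by linarith⟩
        rw [show q * q * k * (k - 1) = q * q * (k * (k - 1)) by ring,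
            Int.mul_ediv_assoc (q * q) heven]
      rw [hloop2, hone, if_pos hkq]
      by_cases hr1 : 0 < r
      · rw [if_pos hr1]
        have h2 := hloop2b hr1
        linarith
      · rw [if_neg hr1]
        have hz : r = 0 := by omega
        have ht0 : tri ((0 : Int).toNat) = 0 := by decide
        rw [hz, ht0]
        linarith
    · -- q ≤ 0 : first loop does nothing
      have hkq : ¬ 0 < k * q := by
        intro h
        nlinarith
      rw [checkLoop1_nonpos q 0 0 (k * q) (by nlinarith)]
      simp only []
      rw [if_neg hkq, checkLoop2_closed' _ _ _ hr0]
      by_cases hr1 : 0 < r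
      · rw [if_pos hr1]
        have := hloop2b hr1
        linarith
      · rw [if_neg hr1]
        have : r = 0 := by omega
        simp [this, tri]
  · -- k < 0, n ≤ 0
    have hb := PySem.Int.mod_neg_bounds n hk
    have hq0 : 0 ≤ q := by
      by_contra h
      push_neg at h
      have h1 : q ≤ -1 := by omega
      nlinarith [hb.1, hb.2]
    have hkq : k * q ≤ 0 := mul_nonpos_of_nonpos_of_nonneg (le_of_lt hk) hq0
    have hn2 : n - r = k * q := by linarith
    rw [hn2, checkLoop1_nonpos q 0 0 (k * q) hkq]
    simp only []
    rw [checkLoop2_nonpos _ _ _ hb.2, if_neg (by omega), if_neg (by omega)]
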